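-- pv_equiv track=rewrite | github.com/elecarlier/Aoc25 | day03/day03.py | part_two
-- ===== SOURCE A (Python) =====
-- def part_two(bank):
--     remove = len(bank) - 12
--     stack = []
--     for digit in bank:
--         while remove > 0 and stack and stack[-1] < digit:
--             stack.pop()
--             remove -= 1
--         stack.append(digit)
--
--     return "".join(stack[:12])
-- ===== SOURCE B (Python) =====
-- def part_two(bank):
--     def pick(s, k):
--         if k == 0:
--             return ""
--         window = s[: len(s) - k + 1]
--         i = window.index(max(window))
--         return s[i] + pick(s[i + 1:], k - 1)
--     return pick(bank, min(12, len(bank)))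
-- ===== Notes on version B (the rewrite author's own statement) =====
-- stated objective: alternative
-- what changed: Replaces the budgeted monotonic-stack pass (pop while a larger digit arrives) by a recursive greedy selection: each output character is the leftmost maximum of the window that still leaves enough characters for the remaining picks.
import Mathlib
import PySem

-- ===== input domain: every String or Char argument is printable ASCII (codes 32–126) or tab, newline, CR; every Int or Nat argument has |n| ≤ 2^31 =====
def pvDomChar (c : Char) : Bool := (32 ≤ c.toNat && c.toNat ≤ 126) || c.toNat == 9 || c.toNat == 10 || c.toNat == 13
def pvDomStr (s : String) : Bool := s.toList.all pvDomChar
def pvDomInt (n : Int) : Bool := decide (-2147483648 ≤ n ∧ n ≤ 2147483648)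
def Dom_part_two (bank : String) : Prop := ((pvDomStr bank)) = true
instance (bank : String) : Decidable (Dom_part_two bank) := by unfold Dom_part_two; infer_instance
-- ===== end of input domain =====

-- B replaces A's budgeted monotonic-stack pass by a recursive greedy pick of the leftmost
-- window maximum (objective: alternative decomposition, same result).

-- ===== PORT A =====
-- The Python stack (append/pop at the right end, stack[-1] = top) is represented
-- top-first, so push = cons and the final `stack[:12]` is `reverse.take 12`.
-- the inner `while remove > 0 and stack and stack[-1] < digit: pop; remove -= 1`:
def popWhile : List Char → Int → Char → List Char × Int
  | [], r, _ => ([], r)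
  | t :: st, r, d => if 0 < r ∧ t < d then popWhile st (r - 1) d else (t :: st, r)

-- one iteration of the `for digit in bank` loop: pop, then `stack.append(digit)`
def stepA (p : List Char × Int) (d : Char) : List Char × Int :=
  (d :: (popWhile p.1 p.2 d).1, (popWhile p.1 p.2 d).2)

-- remove = len(bank) - 12 is inlined into the loop's start state
def part_two (bank : String) : String :=
  String.mk ((bank.toList.foldl stepA ([], (bank.toList.length : Int) - 12)).1.reverse.take 12)

-- ===== PORT B =====
-- `window.index(max(window))`; the `none`/0 defaults are never reached: pick is only
-- invoked with a nonempty window (k ≤ length), where Python's max/index return normally.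
def pickIdx (w : List Char) : Nat :=
  match PySem.List.max? w (fun c => c) with
  | none => 0
  | some m => (PySem.List.index? w m).getD 0

-- pick(s, k): leftmost max of s[:len(s)-k+1], then recurse on the suffix after it
def pick : List Char → Nat → List Char
  | _, 0 => []
  | s, k + 1 =>
    match s.drop (pickIdx (s.take (s.length - k))) with
    | [] => []   -- unreachable (the chosen index is in range)
    | c :: rest => c :: pick rest k

def part_two_alt (bank : String) : String :=
  String.mk (pick bank.toList (min 12 bank.toList.length))

-- ===== PRECONDITION & SPEC =====
def Spec_part_two (bank : String) (out : String) : Prop := out = part_two_alt bank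
instance (bank : String) (out : String) : Decidable (Spec_part_two bank out) := by unfold Spec_part_two; infer_instance

-- ===== CLAIM (what is proved, stated in full; the proofs are below) =====
def Claim_equal_part_two : Prop := ∀ (bank : String), Dom_part_two bank → Spec_part_two bank (part_two bank)

-- ===== LEMMAS AND PROOFS =====

-- popWhile drops some prefix of the stack and pays one budget unit per popped element
lemma pop_spec (st : List Char) (r : Int) (d : Char) :
    ∃ p : Nat, p ≤ st.length ∧ popWhile st r d = (st.drop p, r - p) := by
  induction st generalizing r with
  | nil => exact ⟨0, by simp [popWhile]⟩
  | cons t st ih =>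
    by_cases h : 0 < r ∧ t < d
    · obtain ⟨p, hp, he⟩ := ih (r - 1)
      refine ⟨p + 1, by simpa using hp, ?_⟩
      simp only [popWhile, if_pos h, he]
      rw [List.drop_succ_cons]
      congr 1
      push_cast
      ring
    · exact ⟨0, by simp, by simp [popWhile, h]⟩

lemma pop_nopop (st : List Char) (r : Int) (d : Char) (h : r ≤ 0) :
    popWhile st r d = (st, r) := by
  cases st with
  | nil => rfl
  | cons t st =>
    simp only [popWhile]
    rw [if_neg]
    rintro ⟨h0, -⟩
    omega

lemma pop_all (st : List Char) (r : Int) (d : Char)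
    (hall : ∀ c ∈ st, c < d) (hr : (st.length : Int) ≤ r) :
    popWhile st r d = ([], r - st.length) := by
  induction st generalizing r with
  | nil => simp [popWhile]
  | cons t st ih =>
    have hc : 0 < r ∧ t < d := ⟨by simp at hr; omega, hall t (by simp)⟩
    simp only [popWhile, if_pos hc]
    rw [ih (r - 1) (fun c hc => hall c (List.mem_cons_of_mem _ hc)) (by simp at hr ⊢; omega)]
    congr 1
    simp only [List.length_cons]
    push_cast
    ring

lemma pop_append (st : List Char) (r : Int) (c d : Char) :
    popWhile (st ++ [d]) r c =
      (if (popWhile st r c).1 = [] then popWhile [d] (popWhile st r c).2 c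
       else ((popWhile st r c).1 ++ [d], (popWhile st r c).2)) := by
  induction st generalizing r with
  | nil => simp [popWhile]
  | cons t st ih =>
    by_cases h : 0 < r ∧ t < c
    · simp only [List.cons_append, popWhile, if_pos h]
      exact ih (r - 1)
    · simp [popWhile, h]

lemma run_nopop (l : List Char) (st : List Char) (r : Int) (h : r ≤ 0) :
    List.foldl stepA (st, r) l = (l.reverse ++ st, r) := by
  induction l generalizing st with
  | nil => simp
  | cons c l ih =>
    rw [List.foldl_cons]
    have : stepA (st, r) c = (c :: st, r) := by simp [stepA, pop_nopop _ _ _ h]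
    rw [this, ih (c :: st)]
    simp

lemma run_prefix (p : List Char) (d : Char) :
    ∀ (st : List Char) (r : Int), (∀ c ∈ p, c < d) → (∀ c ∈ st, c < d) →
    ∃ st' : List Char, (∀ c ∈ st', c < d) ∧
      List.foldl stepA (st, r) p
        = (st', r - st.length - p.length + st'.length) := by
  induction p with
  | nil =>
    intro st r _ hst
    exact ⟨st, hst, by simp⟩
  | cons c p ih =>
    intro st r hp hst
    obtain ⟨q, hq, he⟩ := pop_spec st r c
    have hsub : ∀ x ∈ st.drop q, x < d := fun x hx => hst x (List.mem_of_mem_drop hx)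
    obtain ⟨st', h1, h2⟩ := ih (c :: st.drop q) (r - q)
      (fun x hx => hp x (List.mem_cons_of_mem _ hx))
      (by
        intro x hx
        rcases List.mem_cons.mp hx with h | h
        · exact h ▸ hp c (List.mem_cons_self ..)
        · exact hsub x h)
    refine ⟨st', h1, ?_⟩
    rw [List.foldl_cons]
    have hs : stepA (st, r) c = (c :: st.drop q, r - q) := by simp [stepA, he]
    rw [hs, h2]
    congr 1
    simp only [List.length_cons, List.length_drop]
    omega

lemma run_bot (rest : List Char) (d : Char) :
    ∀ (st : List Char) (b : Int),
    (∀ (j : Nat) (hj : j < rest.length), (j : Int) < b - st.length → rest[j] ≤ d) →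
    List.foldl stepA (st ++ [d], b) rest =
      ((List.foldl stepA (st, b) rest).1 ++ [d],
       (List.foldl stepA (st, b) rest).2) := by
  induction rest with
  | nil => intro st b _; simp
  | cons c rest ih =>
    intro st b hcond
    obtain ⟨q, hq, he⟩ := pop_spec st b c
    have hstep2 : stepA (st, b) c = (c :: st.drop q, b - q) := by simp [stepA, he]
    have hstep1 : stepA (st ++ [d], b) c = ((c :: st.drop q) ++ [d], b - q) := by
      by_cases hz : st.drop q = []
      · have hq' : q = st.length := by
          have := List.drop_eq_nil_iff.mp hz
          omega
        have hd : popWhile [d] (b - q) c = ([d], b - q) := by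
          simp only [popWhile]
          rw [if_neg]
          rintro ⟨h0, hdc⟩
          have hcd : (c :: rest)[0] ≤ d := hcond 0 (by simp) (by
            rw [hq'] at h0
            push_cast
            omega)
          simp only [List.getElem_cons_zero] at hcd
          exact absurd hdc (not_lt.mpr hcd)
        simp [stepA, pop_append st b c d, he, hz, hd]
      · simp [stepA, pop_append st b c d, he, hz]
    rw [List.foldl_cons, List.foldl_cons, hstep1, hstep2]
    apply ih
    intro j hj hjb
    have := hcond (j + 1) (by simpa using hj) (by
      simp only [List.length_cons] at hjb ⊢
      have hlen : (st.drop q).length = st.length - q := by simp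
      rw [hlen] at hjb
      push_cast [hq] at hjb ⊢
      omega)
    simpa using this

-- the main induction: the truncated stack result equals the recursive greedy pick
lemma main_run (k : Nat) : ∀ (l : List Char) (r : Int),
    (k : Int) + r = l.length → 0 ≤ r →
    (List.foldl stepA ([], r) l).1.reverse.take k = pick l k := by
  induction k with
  | zero => intro l r _ _; simp [pick]
  | succ k ih =>
    intro l r hlen hr
    have hnk : k < l.length := by omega
    have hwlen : (l.take (l.length - k)).length = l.length - k := by
      rw [List.length_take]
      omega
    -- the window is nonempty, so max/index? return
    obtain ⟨m, hm⟩ : ∃ m, PySem.List.max? (l.take (l.length - k)) (fun c => c) = some m := by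
      cases hmx : PySem.List.max? (l.take (l.length - k)) (fun c => c) with
      | none =>
        have hwne : l.take (l.length - k) = [] := (PySem.List.max?_eq_none_iff _ _).mp hmx
        have := congrArg List.length hwne
        rw [hwlen] at this
        simp at this
        omega
      | some m => exact ⟨m, rfl⟩
    have hmax : ∀ y ∈ l.take (l.length - k), y ≤ m := PySem.List.max?_isMax hm
    have hmem : m ∈ l.take (l.length - k) := PySem.List.max?_mem hm
    obtain ⟨i, hi⟩ : ∃ i, PySem.List.index? (l.take (l.length - k)) m = some i := by
      exact Option.isSome_iff_exists.mp ((PySem.List.index?_isSome_iff _ _).mpr hmem)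
    obtain ⟨pre, suf, hweq, hprelen, hpre⟩ := (PySem.List.index?_eq_some_iff _ _ _).mp hi
    have hpickIdx : pickIdx (l.take (l.length - k)) = i := by
      have hu : pickIdx (l.take (l.length - k))
          = (PySem.List.index? (l.take (l.length - k)) m).getD 0 := by
        unfold pickIdx
        rw [hm]
      rw [hu, hi]
      rfl
    have hilt : i < l.length - k := by
      have : pre.length < (l.take (l.length - k)).length := by
        rw [hweq]; simp
      omega
    have hir : (i : Int) ≤ r := by omega
    -- split l at the chosen index
    have hlsplit : l = pre ++ m :: (suf ++ l.drop (l.length - k)) := by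
      conv_lhs => rw [← List.take_append_drop (l.length - k) l]
      rw [hweq]
      simp
    have hdropi : l.drop i = m :: (suf ++ l.drop (l.length - k)) := by
      conv_lhs => rw [hlsplit]
      rw [← hprelen, List.drop_left]
    have hsuflen : (suf : List Char).length = l.length - k - i - 1 := by
      have := congrArg List.length hweq
      rw [hwlen] at this
      simp at this
      omega
    -- B's side: one unfolding of pick
    have hpick : pick l (k + 1) = m :: pick (suf ++ l.drop (l.length - k)) k := by
      rw [pick, hpickIdx, hdropi]
    rw [hpick]
    -- A's side: run the fold over pre, then m, then the tail
    conv_lhs => rw [hlsplit]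
    rw [List.foldl_append]
    have hprelt : ∀ c ∈ pre, c < m := by
      intro c hc
      have hle : c ≤ m := hmax c (by rw [hweq]; exact List.mem_append_left _ hc)
      exact lt_of_le_of_ne hle (fun h => hpre (h ▸ hc))
    obtain ⟨st', hst', heq⟩ := run_prefix pre m [] r hprelt (by simp)
    rw [heq, List.foldl_cons]
    have hstep : stepA (st', r - ↑([] : List Char).length - ↑pre.length + ↑st'.length) m
        = ([m], r - i) := by
      have hpa := pop_all st' (r - ↑([] : List Char).length - ↑pre.length + ↑st'.length) m hst'
        (by simp only [List.length_nil]; rw [hprelen]; push_cast; omega)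
      simp only [stepA, hpa]
      congr 1
      simp only [List.length_nil, hprelen]
      push_cast
      ring
    rw [hstep]
    have hbot := run_bot (suf ++ l.drop (l.length - k)) m [] (r - i) (by
      intro j hj hjb
      simp only [List.length_nil, Nat.cast_zero, sub_zero] at hjb
      have hjsuf : j < suf.length := by omega
      rw [List.getElem_append_left hjsuf]
      exact hmax _ (by rw [hweq]; exact List.mem_append_right _ (List.mem_cons_of_mem _ (List.getElem_mem _))))
    simp only [List.nil_append] at hbot
    rw [hbot, List.reverse_append]
    simp only [List.reverse_cons, List.reverse_nil, List.nil_append, List.cons_append,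
      List.take_succ_cons]
    congr 1
    apply ih
    · have ht0 : (l.drop (l.length - k)).length = k := by
        rw [List.length_drop]
        omega
      rw [List.length_append, ht0]
      push_cast
      omega
    · omega

lemma pick_full (l : List Char) : pick l l.length = l := by
  induction l with
  | nil => simp [pick]
  | cons c t ih =>
    show pick (c :: t) (t.length + 1) = c :: t
    have hw : (c :: t).take ((c :: t).length - t.length) = [c] := by simp
    have hidx : pickIdx [c] = 0 := by
      simp [pickIdx, PySem.List.max?]
    simp only [pick, hw, hidx, List.drop_zero]
    exact congrArg (c :: ·) ih

-- ===== VERDICT (by name: the statement is the Claim_ definition above) =====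
theorem part_two_spec : Claim_equal_part_two := by
  intro bank _
  unfold Spec_part_two part_two part_two_alt
  set l := bank.toList with hl
  by_cases h : l.length ≤ 12
  · have hr : (l.length : Int) - 12 ≤ 0 := by omega
    rw [run_nopop l [] _ hr]
    simp only [List.append_nil, List.reverse_reverse]
    rw [List.take_of_length_le h, min_eq_right h, pick_full]
  · push_neg at h
    have := main_run 12 l ((l.length : Int) - 12) (by omega) (by omega)
    rw [this, min_eq_left (by omega)]
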